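-- pv_equiv track=rewrite | github.com/javokhirbek1999/AlgorithmsDS | FAANG-Interview-Questions/Google/Most-Booked-Hotel-Room.py | solve
-- ===== SOURCE A (Python) =====
-- from typing import List
-- from collections import defaultdict
--
-- def solve(bookings: List[str]):
--
--     booked_rooms = defaultdict(list)
--
--
--     for booking in bookings:
--
--         booked = booking[0] == '+'
--         room = booking[1:]
--
--         if room not in booked_rooms:
--             booked_rooms[room] = [booked, 1]
--         else:
--             if booked != booked_rooms[room][0]:
--                 if booked:
--                     booked_rooms[room][1] += 1
--
--                 booked_rooms[room][0] = booked
--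
--     max_booked = 0
--     max_booked_room = ""
--
--     for room, status_and_count in booked_rooms.items():
--
--         count = status_and_count[1]
--
--         if max_booked < count:
--             max_booked_room = room
--             max_booked = count
--         elif max_booked == count:
--             max_booked_room = room if room < max_booked_room else max_booked_room
--
--     return max_booked_room
-- ===== SOURCE B (Python) =====
-- def solve(bookings):
--     # Stage 1: group the raw booking statuses per room, in first-seen order.
--     events = {}
--     for booking in bookings:
--         events.setdefault(booking[1:], []).append(booking[0] == '+')
--     # Stage 2: closed-form count per room: one for the first event plus one per
--     # not-booked -> booked edge (A counts exactly these transitions).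
--     counts = {room: sum(cur and not prev for prev, cur in zip([False] + seq, seq))
--                     + (0 if seq[0] else 1)
--               for room, seq in events.items()}
--     # Stage 3: pick by composite key: largest count, then smallest room name.
--     if not counts:
--         return ""
--     return min(counts.items(), key=lambda rc: (-rc[1], rc[0]))[0]
-- ===== Notes on version B (the rewrite author's own statement) =====
-- stated objective: alternative
-- what changed: A threads per-room (last_status, count) state through one dict and a fused running-max scan; B instead groups the raw booking statuses per room into lists, computes each room's count by a closed edge-count formula (one per first event plus one per not-booked->booked edge via zip), and selects with min over items keyed by (-count, room).
import Mathlib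
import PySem

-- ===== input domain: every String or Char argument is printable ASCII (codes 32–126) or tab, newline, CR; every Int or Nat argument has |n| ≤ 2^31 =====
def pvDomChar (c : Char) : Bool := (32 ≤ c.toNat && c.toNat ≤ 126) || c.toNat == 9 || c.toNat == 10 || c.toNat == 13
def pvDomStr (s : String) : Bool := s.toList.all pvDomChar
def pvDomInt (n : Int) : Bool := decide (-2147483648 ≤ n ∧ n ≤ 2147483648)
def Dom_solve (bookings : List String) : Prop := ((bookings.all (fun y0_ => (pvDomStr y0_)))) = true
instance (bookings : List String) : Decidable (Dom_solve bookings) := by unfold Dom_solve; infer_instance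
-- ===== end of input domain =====

-- B replaces A's incremental (last_status, count) state and fused running-max scan by three staged
-- passes: group raw statuses per room, count each room by a closed edge-count formula over its
-- event list, then pick by a composite (-count, room) min key; objective: alternative.

-- ===== PORT A =====
-- one booking step of A's first loop (dict room -> (last_status, count))
def stepA (d : PySem.Dict String (Bool × Int)) (booking : String) : PySem.Dict String (Bool × Int) :=
  let booked := PySem.Str.pyGet? booking 0 == some '+'   -- booking[0] == '+'  (raises on ""; excluded by Pre_)
  let room := PySem.Str.slice booking (some 1) none      -- booking[1:]
  if d.contains room = false then
    d.insert room (booked, 1)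
  else
    let v := d.getD room (false, 0)
    if booked != v.1 then
      d.insert room (booked, if booked then v.2 + 1 else v.2)
    else d

def solve (bookings : List String) : String :=
  let booked_rooms := bookings.foldl stepA PySem.Dict.empty
  let res := booked_rooms.items.foldl (fun acc p =>
      let count := p.2.2
      if acc.1 < count then (count, p.1)
      else if acc.1 == count then (acc.1, if p.1 < acc.2 then p.1 else acc.2)
      else acc) ((0 : Int), "")
  res.2

-- ===== PORT B =====
-- one step of B's grouping loop: events.setdefault(booking[1:], []).append(booking[0] == '+')
def stepGroup (d : PySem.Dict String (List Bool)) (booking : String) : PySem.Dict String (List Bool) :=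
  let room := PySem.Str.slice booking (some 1) none      -- booking[1:]
  let booked := PySem.Str.pyGet? booking 0 == some '+'   -- booking[0] == '+'  (raises on ""; excluded by Pre_)
  d.modify room [] (fun l => l ++ [booked])

-- sum(cur and not prev for prev, cur in zip([False] + seq, seq)) + (0 if seq[0] else 1)
-- (seq is never empty where B calls this; pyGetD ports seq[0] on that domain)
def countOf (seq : List Bool) : Int :=
  (((false :: seq).zip seq).map (fun p => if p.2 && !p.1 then (1 : Int) else 0)).sum
  + (if PySem.List.pyGetD seq 0 false then 0 else 1)

def solve_alt (bookings : List String) : String :=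
  let events := bookings.foldl stepGroup PySem.Dict.empty
  let counts := events.items.foldl (fun d p => d.insert p.1 (countOf p.2)) PySem.Dict.empty
  if counts.items = [] then ""
  else ((PySem.List.min2? counts.items (fun p => -p.2) (fun p => p.1)).getD ("", 0)).1

-- ===== PRECONDITION & SPEC =====
-- Pre_ excludes lists containing the empty string: there booking[0] raises IndexError in A (and in B).
def Pre_solve (bookings : List String) : Prop := ∀ s ∈ bookings, s ≠ ""
instance (bookings : List String) : Decidable (Pre_solve bookings) := by unfold Pre_solve; infer_instance
def pvWitness_solve : List String := ["+1A", "-1A", "+1A", "+2B"]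

def Spec_solve (bookings : List String) (out : String) : Prop := out = solve_alt bookings
instance (bookings : List String) (out : String) : Decidable (Spec_solve bookings out) := by unfold Spec_solve; infer_instance

-- ===== CLAIM (what is proved, stated in full; the proofs are below) =====
def Claim_equal_solve : Prop := ∀ (bookings : List String), Dom_solve bookings → Pre_solve bookings → Spec_solve bookings (solve bookings)

-- ===== LEMMAS AND PROOFS =====

-- A's per-room update, abstracted from one room's point of view
def updA (sc : Bool × Int) (b : Bool) : Bool × Int :=
  if b != sc.1 then (b, if b then sc.2 + 1 else sc.2) else sc

-- the (last_status, count) pair A stores for a room whose event sequence is seq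
def A1 (seq : List Bool) : Bool × Int :=
  match seq with
  | [] => (false, 0)
  | h :: t => t.foldl updA (h, 1)

theorem A1_snoc (seq : List Bool) (h : seq ≠ []) (b : Bool) :
    A1 (seq ++ [b]) = updA (A1 seq) b := by
  cases seq with
  | nil => exact absurd rfl h
  | cons x t => simp [A1, List.foldl_append]

theorem foldl_updA_pos (t : List Bool) : ∀ (s : Bool) (c : Int), 1 ≤ c → 1 ≤ (t.foldl updA (s, c)).2 := by
  induction t with
  | nil => intro s c hc; simpa using hc
  | cons x t ih =>
    intro s c hc
    simp only [List.foldl_cons]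
    unfold updA
    split_ifs with h1 h2
    · exact ih _ _ (by omega)
    · exact ih _ _ hc
    · exact ih _ _ hc

theorem A1_pos (seq : List Bool) (h : seq ≠ []) : 1 ≤ (A1 seq).2 := by
  cases seq with
  | nil => exact absurd rfl h
  | cons x t => exact foldl_updA_pos t x 1 (by omega)

-- the per-room edge count B's zip-comprehension computes, given the previous status
def edges (p : Bool) (l : List Bool) : Int :=
  match l with
  | [] => 0
  | x :: t => (if x && !p then 1 else 0) + edges x t

theorem zip_shift_sum (l : List Bool) : ∀ p : Bool,
    (((p :: l).zip l).map (fun q => if q.2 && !q.1 then (1 : Int) else 0)).sum = edges p l := by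
  induction l with
  | nil => intro p; simp [edges]
  | cons x t ih =>
    intro p
    rw [show (p :: x :: t).zip (x :: t) = (p, x) :: ((x :: t).zip t) from rfl]
    rw [List.map_cons, List.sum_cons, ih x, edges]

theorem foldl_updA_snd (t : List Bool) : ∀ (s : Bool) (c : Int),
    (t.foldl updA (s, c)).2 = c + edges s t := by
  induction t with
  | nil => intro s c; simp [edges]
  | cons x t ih =>
    intro s c
    simp only [List.foldl_cons]
    cases x <;> cases s <;> simp [updA, edges, ih] <;> omega

theorem countOf_eq_A1 (seq : List Bool) (h : seq ≠ []) : countOf seq = (A1 seq).2 := by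
  cases seq with
  | nil => exact absurd rfl h
  | cons x t =>
    unfold countOf A1
    rw [zip_shift_sum, foldl_updA_snd]
    simp only [PySem.List.pyGetD_zero_cons]
    cases x <;> simp [edges] <;> omega

-- the relation between A's dict and B's dict after any number of booking steps
def RelAB (dA : PySem.Dict String (Bool × Int)) (dB : PySem.Dict String (List Bool)) : Prop :=
  dA.items = dB.items.map (fun p => (p.1, A1 p.2)) ∧ dB.keys.Nodup ∧ ∀ p ∈ dB.items, p.2 ≠ []

theorem keys_of_rel (dA : PySem.Dict String (Bool × Int)) (dB : PySem.Dict String (List Bool))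
    (h : dA.items = dB.items.map (fun p => (p.1, A1 p.2))) : dA.keys = dB.keys := by
  simp only [PySem.Dict.keys, h, List.map_map]
  rfl

theorem step_rel (dA : PySem.Dict String (Bool × Int)) (dB : PySem.Dict String (List Bool))
    (b : String) (h : RelAB dA dB) : RelAB (stepA dA b) (stepGroup dB b) := by
  obtain ⟨hitems, hnd, hne⟩ := h
  have hkeys : dA.keys = dB.keys := keys_of_rel dA dB hitems
  have hndA : dA.keys.Nodup := hkeys ▸ hnd
  have hcont : ∀ k, dA.contains k = dB.contains k := by
    intro k
    rw [PySem.Dict.contains_eq_decide_mem_keys, PySem.Dict.contains_eq_decide_mem_keys, hkeys]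
  unfold stepA stepGroup PySem.Dict.modify
  set room := PySem.Str.slice b (some 1) none with hroom
  set booked := (PySem.Str.pyGet? b 0 == some '+') with hbooked
  by_cases hc : dB.contains room
  · -- the room was seen before
    have hsome : (dB.get? room).isSome := by rw [← PySem.Dict.contains_eq_isSome_get?]; exact hc
    obtain ⟨seq, hseq⟩ := Option.isSome_iff_exists.mp hsome
    have hgetDB : dB.getD room [] = seq := PySem.Dict.getD_of_get?_eq_some dB [] hseq
    have hmemB : (room, seq) ∈ dB.items := PySem.Dict.mem_items_of_get?_eq_some dB hseq
    have hseqne : seq ≠ [] := hne _ hmemB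
    have hmemA : (room, A1 seq) ∈ dA.items := by
      rw [hitems]
      exact List.mem_map.mpr ⟨(room, seq), hmemB, rfl⟩
    have hgetDA : dA.getD room (false, 0) = A1 seq := PySem.Dict.getD_of_mem_items dA hmemA hndA _
    have hcA : dA.contains room = true := by rw [hcont]; exact hc
    have hval : ∀ p : String × List Bool, p.1 = room → p ∈ dB.items → p.2 = seq := by
      intro p hp hpm
      have := PySem.Dict.get?_of_mem_items dB (k := p.1) (v := p.2) (by exact hpm) hnd
      rw [hp, hseq] at this
      exact (Option.some.inj this).symm
    have hitemsB' := PySem.Dict.items_insert_of_contains dB (k := room) (seq ++ [booked]) hc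
    refine ⟨?_, ?_, ?_⟩
    · -- items correspondence
      simp only [hcA, Bool.true_eq_false, if_false, hgetDA, hgetDB]
      by_cases hbk : booked != (A1 seq).1
      · -- status changed: A inserts the updated pair
        simp only [hbk, if_true]
        rw [PySem.Dict.items_insert_of_contains dA (k := room) _ hcA, hitemsB', hitems,
          List.map_map, List.map_map]
        apply List.map_congr_left
        intro p hp
        simp only [Function.comp_apply]
        by_cases hpk : p.1 == room
        · have h1 : A1 (seq ++ [booked]) = (booked, if booked then (A1 seq).2 + 1 else (A1 seq).2) := by
            rw [A1_snoc seq hseqne, updA, if_pos hbk]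
          simp [hpk, h1]
        · simp [hpk]
      · -- status unchanged: A leaves its dict alone, B appends an absorbed event
        simp only [hbk, Bool.false_eq_true, if_false]
        rw [hitemsB', hitems, List.map_map]
        symm
        apply List.map_congr_left
        intro p hp
        simp only [Function.comp_apply]
        by_cases hpk : p.1 == room
        · have hpr : p.1 = room := by simpa using hpk
          have hps : p.2 = seq := hval p hpr hp
          have h1 : A1 (seq ++ [booked]) = A1 seq := by
            rw [A1_snoc seq hseqne, updA, if_neg (by simpa using hbk)]
          simp [h1, hpr, hps]
        · simp [hpk]
    · -- keys stay nodup
      rw [PySem.Dict.keys_insert_of_contains dB _ hc]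
      exact hnd
    · -- values stay nonempty
      intro p hp
      replace hp : p ∈ (dB.insert room (seq ++ [booked])).items := by simpa [hgetDB] using hp
      rw [hitemsB'] at hp
      obtain ⟨q, hq, hqe⟩ := List.mem_map.mp hp
      by_cases hqk : q.1 == room
      · simp only [hqk, if_true] at hqe
        subst hqe; simp
      · simp only [hqk, Bool.false_eq_true, if_false] at hqe
        subst hqe; exact hne _ hq
  · -- a fresh room
    have hcA : dA.contains room = false := by rw [hcont]; simpa using hc
    have hcB : dB.contains room = false := by simpa using hc
    have hgetDB : dB.getD room [] = [] := PySem.Dict.getD_of_not_contains dB [] hcB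
    have hroomnk : room ∉ dB.keys := by
      rw [PySem.Dict.contains_eq_decide_mem_keys] at hcB
      simpa using hcB
    refine ⟨?_, ?_, ?_⟩
    · simp only [hcA, if_true]
      rw [PySem.Dict.items_insert_of_not_contains dA _ hcA,
        PySem.Dict.items_insert_of_not_contains dB _ hcB, List.map_append, hitems, hgetDB]
      rfl
    · rw [PySem.Dict.keys_insert_of_not_contains dB _ hcB]
      simp only [List.nodup_append]
      refine ⟨hnd, List.nodup_singleton _, ?_⟩
      intro a ha c hc2
      simp only [List.mem_singleton] at hc2
      subst hc2
      intro h
      subst h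
      exact hroomnk ha
    · intro p hp
      rw [PySem.Dict.items_insert_of_not_contains dB _ hcB] at hp
      rcases List.mem_append.mp hp with h1 | h2
      · exact hne _ h1
      · simp only [List.mem_singleton] at h2
        subst h2; simp [hgetDB]

theorem rel_foldl (bookings : List String) :
    ∀ (dA : PySem.Dict String (Bool × Int)) (dB : PySem.Dict String (List Bool)),
    RelAB dA dB → RelAB (bookings.foldl stepA dA) (bookings.foldl stepGroup dB) := by
  induction bookings with
  | nil => intro dA dB h; exact h
  | cons b bs ih => intro dA dB h; exact ih _ _ (step_rel dA dB b h)

-- B's two selection quantities over a plain (room, count) list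
def pyMaxInt (l : List Int) : Int :=
  match l with
  | [] => 0
  | c :: cs => cs.foldl max c

def pyMinStr (l : List String) : String :=
  match l with
  | [] => ""
  | r :: rs => rs.foldl min r

def bestOf (l : List (String × Int)) : Int := pyMaxInt (l.map (fun p => p.2))
def minRoomOf (l : List (String × Int)) : String :=
  pyMinStr ((l.filter (fun p => p.2 == bestOf l)).map (fun p => p.1))

theorem bestOf_ub (l : List (String × Int)) : ∀ p ∈ l, p.2 ≤ bestOf l := by
  intro p hp
  cases l with
  | nil => cases hp
  | cons q t =>
    have h2 := (PySem.List.le_foldl_max (t.map (fun p => p.2)) q.2).2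
    have hhd := (PySem.List.le_foldl_max (t.map (fun p => p.2)) q.2).1
    simp only [bestOf, pyMaxInt, List.map_cons]
    rcases List.mem_cons.mp hp with rfl | hpt
    · exact hhd
    · exact h2 _ (List.mem_map_of_mem hpt)

theorem bestOf_attain (l : List (String × Int)) (h : l ≠ []) :
    ∃ p ∈ l, p.2 = bestOf l := by
  cases l with
  | nil => exact absurd rfl h
  | cons q t =>
    rcases PySem.List.foldl_max_mem (t.map (fun p => p.2)) q.2 with h1 | h2
    · exact ⟨q, by simp, by simp only [bestOf, pyMaxInt, List.map_cons]; exact h1.symm⟩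
    · rcases List.mem_map.mp h2 with ⟨p, hpt, hpv⟩
      exact ⟨p, by simp [hpt], by simp only [bestOf, pyMaxInt, List.map_cons]; exact hpv⟩

theorem bestOf_snoc (l : List (String × Int)) (x : String × Int) (h : l ≠ []) :
    bestOf (l ++ [x]) = max (bestOf l) x.2 := by
  cases l with
  | nil => exact absurd rfl h
  | cons q t => simp [bestOf, pyMaxInt, List.foldl_append]

theorem minRoomOf_snoc_lt (l : List (String × Int)) (x : String × Int)
    (hl : l ≠ []) (h : bestOf l < x.2) : minRoomOf (l ++ [x]) = x.1 := by
  have hb := bestOf_snoc l x hl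
  have hmax : max (bestOf l) x.2 = x.2 := by omega
  have hfl : l.filter (fun p => p.2 == bestOf (l ++ [x])) = [] := by
    apply List.filter_eq_nil_iff.mpr
    intro p hp
    have := bestOf_ub l p hp
    rw [hb, hmax]
    simp only [beq_iff_eq]
    omega
  unfold minRoomOf
  rw [List.filter_append, hfl]
  simp [pyMinStr, hb, hmax]

theorem minRoomOf_snoc_eq (l : List (String × Int)) (x : String × Int)
    (hl : l ≠ []) (h : bestOf l = x.2) :
    minRoomOf (l ++ [x]) = min (minRoomOf l) x.1 := by
  have hb := bestOf_snoc l x hl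
  have hmax : max (bestOf l) x.2 = bestOf l := by omega
  obtain ⟨p0, hp0, hp0v⟩ := bestOf_attain l hl
  have hmem : p0 ∈ l.filter (fun p => p.2 == bestOf l) :=
    List.mem_filter.mpr ⟨hp0, by simp [hp0v]⟩
  obtain ⟨c, cs, hc⟩ := List.exists_cons_of_ne_nil (List.ne_nil_of_mem hmem)
  unfold minRoomOf
  rw [List.filter_append, hb, hmax, hc]
  simp [pyMinStr, h, List.foldl_append]

theorem minRoomOf_snoc_gt (l : List (String × Int)) (x : String × Int)
    (hl : l ≠ []) (h : x.2 < bestOf l) : minRoomOf (l ++ [x]) = minRoomOf l := by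
  have hb := bestOf_snoc l x hl
  have hmax : max (bestOf l) x.2 = bestOf l := by omega
  unfold minRoomOf
  rw [List.filter_append, hb, hmax]
  have hfx : [x].filter (fun p => p.2 == bestOf l) = [] := by
    simp only [List.filter_cons, List.filter_nil, beq_iff_eq]
    simp only [show ¬ (x.2 = bestOf l) by omega]
    simp
  rw [hfx, List.append_nil]

-- A's running (max-count, min-room) scan computes B's two pass results
theorem scan_eq (l : List (String × Int)) (h : ∀ p ∈ l, 1 ≤ p.2) :
    (l.foldl (fun acc p =>
      if acc.1 < p.2 then (p.2, p.1)
      else if acc.1 == p.2 then (acc.1, if p.1 < acc.2 then p.1 else acc.2)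
      else acc) ((0 : Int), "")) =
    (bestOf l, if l = [] then "" else minRoomOf l) := by
  induction l using List.reverseRecOn with
  | nil => simp [bestOf, pyMaxInt]
  | append_singleton l x ih =>
    have hl : ∀ p ∈ l, 1 ≤ p.2 := fun p hp => h p (by simp [hp])
    have hx : 1 ≤ x.2 := h x (by simp)
    rw [List.foldl_append, ih hl]
    by_cases hnil : l = []
    · subst hnil
      simp only [List.nil_append, List.foldl_cons, List.foldl_nil]
      have h0 : bestOf ([] : List (String × Int)) = 0 := rfl
      rw [h0]
      simp only [show (0:Int) < x.2 by omega, if_true]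
      refine Prod.ext ?_ ?_
      · show x.2 = bestOf [x]
        simp [bestOf, pyMaxInt]
      · show x.1 = if [x] = [] then "" else minRoomOf [x]
        simp [minRoomOf, bestOf, pyMaxInt, pyMinStr]
    · have hM1 : 1 ≤ bestOf l := by
        obtain ⟨p0, hp0, hp0v⟩ := bestOf_attain l hnil
        have := hl p0 hp0
        omega
      simp only [List.foldl_cons, List.foldl_nil, hnil, if_false]
      rw [bestOf_snoc l x hnil]
      simp only [show ¬ (l ++ [x] = []) by simp, if_false]
      rcases lt_trichotomy (bestOf l) x.2 with hlt | heq | hgt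
      · rw [minRoomOf_snoc_lt l x hnil hlt]
        simp [hlt, show max (bestOf l) x.2 = x.2 by omega]
      · rw [minRoomOf_snoc_eq l x hnil heq]
        simp only [heq, lt_self_iff_false, if_false, BEq.rfl, if_true,
          show max x.2 x.2 = x.2 from max_self _]
        refine Prod.ext rfl ?_
        dsimp only
        rcases lt_or_ge x.1 (minRoomOf l) with hr | hr
        · simp [hr, min_eq_right hr.le]
        · simp [not_lt.mpr hr, min_eq_left hr]
      · rw [minRoomOf_snoc_gt l x hnil hgt]
        simp [show ¬ (bestOf l < x.2) by omega, show ¬ (bestOf l = x.2) by omega,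
          show max (bestOf l) x.2 = bestOf l by omega]

-- B's min(items, key=(-count, room)) picks exactly (min room among max-count rooms, max count)
theorem min2_eq (l : List (String × Int)) (h : l ≠ []) :
    PySem.List.min2? l (fun p => -p.2) (fun p => p.1) = some (minRoomOf l, bestOf l) := by
  induction l using List.reverseRecOn with
  | nil => exact absurd rfl h
  | append_singleton l x ih =>
    by_cases hnil : l = []
    · subst hnil
      simp only [List.nil_append]
      show some x = some (minRoomOf [x], bestOf [x])
      have : (minRoomOf [x], bestOf [x]) = x := by
        refine Prod.ext ?_ ?_ <;> simp [minRoomOf, bestOf, pyMaxInt, pyMinStr]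
      rw [this]
    · have ihv := ih hnil
      unfold PySem.List.min2? at ihv ⊢
      rw [List.foldl_append, ihv]
      simp only [List.foldl_cons, List.foldl_nil]
      rw [bestOf_snoc l x hnil]
      rcases lt_trichotomy (bestOf l) x.2 with hlt | heq | hgt
      · rw [minRoomOf_snoc_lt l x hnil hlt]
        simp [show -x.2 < -(bestOf l) by omega, show max (bestOf l) x.2 = x.2 by omega]
      · rw [minRoomOf_snoc_eq l x hnil heq]
        simp only [heq, lt_self_iff_false, decide_false, Bool.not_false,
          Bool.true_and, Bool.false_or, show max x.2 x.2 = x.2 from max_self _]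
        rcases lt_or_ge x.1 (minRoomOf l) with hr | hr
        · simp [hr, min_eq_right hr.le]
        · simp [not_lt.mpr hr, min_eq_left hr]
      · rw [minRoomOf_snoc_gt l x hnil hgt]
        simp [show ¬ (-x.2 < -(bestOf l)) by omega, show -(bestOf l) < -x.2 by omega,
          show max (bestOf l) x.2 = bestOf l by omega]

-- ===== VERDICT (by name: the statement is the Claim_ definition above) =====
theorem solve_spec : Claim_equal_solve := by
  intro bookings _ _
  unfold Spec_solve
  have hrel : RelAB (bookings.foldl stepA PySem.Dict.empty) (bookings.foldl stepGroup PySem.Dict.empty) :=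
    rel_foldl bookings PySem.Dict.empty PySem.Dict.empty
      ⟨rfl, by simp [PySem.Dict.keys_empty], by intro p hp; cases hp⟩
  obtain ⟨hitems, hnd, hne⟩ := hrel
  set dB := bookings.foldl stepGroup PySem.Dict.empty with hdB
  -- the counts dict is built by inserting fresh distinct keys
  have hndfst : (dB.items.map (fun p => p.1)).Nodup := hnd
  have hcounts : (dB.items.foldl (fun d p => d.insert p.1 (countOf p.2)) PySem.Dict.empty).items
      = dB.items.map (fun p => (p.1, countOf p.2)) := by
    have := PySem.Dict.items_foldl_insert_fresh dB.items (fun p => p.1) (fun p => countOf p.2)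
      PySem.Dict.empty (by intro a _; simp [PySem.Dict.contains_empty]) hndfst
    simpa using this
  -- both selection stages work over the same (room, count) list
  set lp := dB.items.map (fun p => (p.1, (A1 p.2).2)) with hlp
  have hcounts' : (dB.items.foldl (fun d p => d.insert p.1 (countOf p.2)) PySem.Dict.empty).items = lp := by
    rw [hcounts, hlp]
    apply List.map_congr_left
    intro p hp
    rw [countOf_eq_A1 p.2 (hne p hp)]
  have hpos : ∀ q ∈ lp, 1 ≤ q.2 := by
    intro q hq
    obtain ⟨p, hp, hpe⟩ := List.mem_map.mp hq
    subst hpe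
    exact A1_pos p.2 (hne p hp)
  -- A's side: rewrite the scan over items into the scan over lp
  show (List.foldl _ ((0 : Int), "") (bookings.foldl stepA PySem.Dict.empty).items).2 = _
  rw [hitems]
  have hfold :
      (List.foldl (fun acc (p : String × (Bool × Int)) =>
        let count := p.2.2
        if acc.1 < count then (count, p.1)
        else if acc.1 == count then (acc.1, if p.1 < acc.2 then p.1 else acc.2)
        else acc) ((0 : Int), "") (dB.items.map (fun p => (p.1, A1 p.2)))) =
      (List.foldl (fun acc (q : String × Int) =>
        if acc.1 < q.2 then (q.2, q.1)
        else if acc.1 == q.2 then (acc.1, if q.1 < acc.2 then q.1 else acc.2)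
        else acc) ((0 : Int), "") lp) := by
    rw [List.foldl_map, hlp, List.foldl_map]
  rw [hfold, scan_eq lp hpos]
  -- B's side
  have hB : solve_alt bookings = (if lp = [] then "" else minRoomOf lp) := by
    unfold solve_alt
    rw [← hdB]
    show (if (List.foldl (fun d p => d.insert p.1 (countOf p.2)) PySem.Dict.empty dB.items).items = []
        then ""
        else ((PySem.List.min2? (List.foldl (fun d p => d.insert p.1 (countOf p.2)) PySem.Dict.empty dB.items).items
          (fun p => -p.2) (fun p => p.1)).getD ("", 0)).1) = _
    rw [hcounts']
    by_cases hnil : lp = []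
    · simp [hnil]
    · rw [min2_eq lp hnil]
      simp [hnil]
  rw [hB]
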